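-- pv_equiv track=rewrite | github.com/quan118/aoc2020 | day17_conway_cubes.py | advance
-- ===== SOURCE A (Python) =====
-- import copy
--
-- def count_active_neighbors(x, y, z, state):
--   cnt = 0
--   for dz in range(-1,2):
--     z1=z+dz
--     if z1<0 or z1>=len(state):
--       continue
--     for dy in range(-1,2):
--       y1=y+dy
--       if y1<0 or y1>=len(state[0]):
--         continue
--       for dx in range(-1,2):
--         x1=x+dx
--         if x1<0 or x1>=len(state[0][0]):
--           continue
--         if dx == 0 and dy == 0 and dz == 0:
--           continue
--         if state[z1][y1][x1] == '#':
--           cnt += 1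
--   return cnt
--
-- def advance(state, cycles):
--   old = copy.deepcopy(state)
--   new = copy.deepcopy(state)
--   for i in range(cycles):
--     for z in range(len(state)):
--       for y in range(len(state[0])):
--         for x in range(len(state[0][0])):
--           active_neighbors = count_active_neighbors(x, y, z, old)
--           if old[z][y][x] == '#'and active_neighbors not in [2, 3]:
--             new[z][y][x] = '.'
--           elif old[z][y][x] == '.' and active_neighbors == 3:
--             new[z][y][x] = '#'
--     old = copy.deepcopy(new)
--   return old
-- ===== SOURCE B (Python) =====
-- def _rule(c, n):
--   if c == '#' and n not in (2, 3):
--     return '.'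
--   if c == '.' and n == 3:
--     return '#'
--   return c
--
--
-- def advance(state, cycles):
--   cur = [[list(row) for row in plane] for plane in state]
--   for _ in range(cycles):
--     cnt = {}
--     for z, plane in enumerate(cur):
--       for y, row in enumerate(plane):
--         for x, c in enumerate(row):
--           if c == '#':
--             for dz in (-1, 0, 1):
--               for dy in (-1, 0, 1):
--                 for dx in (-1, 0, 1):
--                   if dz or dy or dx:
--                     k = (z + dz, y + dy, x + dx)
--                     cnt[k] = cnt.get(k, 0) + 1
--     cur = [[[_rule(c, cnt.get((z, y, x), 0)) for x, c in enumerate(row)]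
--             for y, row in enumerate(plane)]
--            for z, plane in enumerate(cur)]
--   return cur
-- ===== Notes on version B (the rewrite author's own statement) =====
-- stated objective: alternative
-- what changed: B replaces A's per-cell gather (27 offset probes with bounds checks for every cell, every cycle) by a scatter pass: each cycle it builds one dict counter by having every '#' cell increment its 26 neighbour coordinates, then rebuilds the grid in a second pass reading the precomputed counts, instead of A's deepcopy double-buffer with in-place writes.
-- outside the precondition, e.g. on advance([[['#'], ['#', '#']]], 1): A returns [[['.'], ['.', '#']]], B returns [[['#'], ['#', '#']]]
import Mathlib
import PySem

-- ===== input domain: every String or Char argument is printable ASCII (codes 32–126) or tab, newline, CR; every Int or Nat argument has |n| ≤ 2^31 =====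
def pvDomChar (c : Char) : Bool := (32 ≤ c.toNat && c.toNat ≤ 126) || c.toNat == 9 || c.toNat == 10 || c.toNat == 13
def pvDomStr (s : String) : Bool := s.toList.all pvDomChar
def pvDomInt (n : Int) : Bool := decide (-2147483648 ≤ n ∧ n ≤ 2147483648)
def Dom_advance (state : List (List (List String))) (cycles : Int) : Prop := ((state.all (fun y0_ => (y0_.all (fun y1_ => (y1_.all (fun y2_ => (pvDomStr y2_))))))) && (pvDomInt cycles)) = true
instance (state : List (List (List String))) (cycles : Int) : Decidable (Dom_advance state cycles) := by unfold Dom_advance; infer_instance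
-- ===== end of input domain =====

-- B replaces A's per-cell gather of the 27 neighbour offsets by a per-cycle scatter: every '#'
-- cell increments a dict counter at its 26 neighbour coordinates, and a second pass rebuilds the
-- grid from the precomputed counts (objective: alternative algorithm, same asymptotic cost).
-- A never mutates its argument (it deep-copies); B does not either.

-- ===== PORT A =====
-- count_active_neighbors: triple loop over range(-1,2) with bounds guards.
-- pyGetD is exact here: the z index is guarded in range, and under Pre_ (rectangular grid)
-- the y/x guards against the first plane's/row's length put the indices in range too.
def cntA (x y z : Int) (st : List (List (List String))) : Int :=
  (PySem.List.pyRange (-1) 2 1).foldl (fun cnt dz =>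
    if z + dz < 0 ∨ (st.length : Int) ≤ z + dz then cnt
    else (PySem.List.pyRange (-1) 2 1).foldl (fun cnt dy =>
      if y + dy < 0 ∨ ((st.headD []).length : Int) ≤ y + dy then cnt
      else (PySem.List.pyRange (-1) 2 1).foldl (fun cnt dx =>
        if x + dx < 0 ∨ (((st.headD []).headD []).length : Int) ≤ x + dx then cnt
        else if dx = 0 ∧ dy = 0 ∧ dz = 0 then cnt
        else if PySem.List.pyGetD (PySem.List.pyGetD (PySem.List.pyGetD st (z + dz) []) (y + dy) []) (x + dx) "" = "#" then cnt + 1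
        else cnt) cnt) cnt) 0

-- advance: the in-place writes go into `new`, which at the start of every cycle equals `old`
-- (old = deepcopy(new) after each cycle, and both start as copies of state), so the grid after a
-- cycle is rebuilt cell by cell from `old`: unchanged cells keep old's value.
def advance (state : List (List (List String))) (cycles : Int) : List (List (List String)) :=
  (PySem.List.pyRange 0 cycles 1).foldl (fun old _ =>
    (List.range state.length).map (fun (z : Nat) =>
      (List.range (state.headD []).length).map (fun (y : Nat) =>
        (List.range ((state.headD []).headD []).length).map (fun (x : Nat) =>
          let c := PySem.List.pyGetD (PySem.List.pyGetD (PySem.List.pyGetD old (z : Int) []) (y : Int) []) (x : Int) ""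
          let an := cntA (x : Int) (y : Int) (z : Int) old
          if c = "#" ∧ ¬(an = 2 ∨ an = 3) then "."
          else if c = "." ∧ an = 3 then "#"
          else c)))) state

-- ===== PORT B =====
-- _rule: the update rule applied to a cell's character and its precomputed neighbour count.
def ruleB (c : String) (n : Int) : String :=
  if c = "#" ∧ ¬(n = 2 ∨ n = 3) then "."
  else if c = "." ∧ n = 3 then "#"
  else c

-- the scatter pass: cnt = {}; every '#' cell bumps cnt at each of its 26 neighbour coordinates
-- ('cnt[k] = cnt.get(k, 0) + 1'); out-of-grid keys are simply never read back.
def scatterB (g : List (List (List String))) : PySem.Dict (Int × Int × Int) Int :=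
  (PySem.List.enumerate g 0).foldl (fun d zp =>
    (PySem.List.enumerate zp.2 0).foldl (fun d yp =>
      (PySem.List.enumerate yp.2 0).foldl (fun d xc =>
        if xc.2 = "#" then
          ([-1, 0, 1] : List Int).foldl (fun d dz =>
            ([-1, 0, 1] : List Int).foldl (fun d dy =>
              ([-1, 0, 1] : List Int).foldl (fun d dx =>
                if ¬(dz = 0 ∧ dy = 0 ∧ dx = 0) then
                  d.insert (zp.1 + dz, yp.1 + dy, xc.1 + dx)
                    (d.getD (zp.1 + dz, yp.1 + dy, xc.1 + dx) 0 + 1)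
                else d) d) d) d
        else d) d) d) PySem.Dict.empty

def advance_alt (state : List (List (List String))) (cycles : Int) : List (List (List String)) :=
  (PySem.List.pyRange 0 cycles 1).foldl (fun cur _ =>
    let cnt := scatterB cur
    (PySem.List.enumerate cur 0).map (fun zp =>
      (PySem.List.enumerate zp.2 0).map (fun yp =>
        (PySem.List.enumerate yp.2 0).map (fun xc =>
          ruleB xc.2 (cnt.getD (zp.1, yp.1, xc.1) 0))))) state

-- ===== PRECONDITION & SPEC =====
-- Pre_ excludes ragged grids when cycles ≥ 1: they are outside the task's natural domain (a Conway
-- grid is rectangular) — A sizes every loop and neighbour window by the FIRST plane/row, so on a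
-- ragged grid it raises IndexError when some plane/row is shorter than the first, and where all are
-- at least as long it freezes the out-of-window cells, while B processes each row by its own length.
def Pre_advance (state : List (List (List String))) (cycles : Int) : Prop :=
  cycles ≤ 0 ∨
    ∀ p ∈ state, p.length = (state.headD []).length ∧
      ∀ r ∈ p, r.length = ((state.headD []).headD []).length
instance (state : List (List (List String))) (cycles : Int) : Decidable (Pre_advance state cycles) := by unfold Pre_advance; infer_instance

def pvWitness_advance : List (List (List String)) × Int := ([[[".", "#"], ["#", "#"]]], 1)

def Spec_advance (state : List (List (List String))) (cycles : Int) (out : List (List (List String))) : Prop := out = advance_alt state cycles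
instance (state : List (List (List String))) (cycles : Int) (out : List (List (List String))) : Decidable (Spec_advance state cycles out) := by unfold Spec_advance; infer_instance

-- ===== CLAIM (what is proved, stated in full; the proofs are below) =====
def Claim_equal_advance : Prop := ∀ (state : List (List (List String))) (cycles : Int), Dom_advance state cycles → Pre_advance state cycles → Spec_advance state cycles (advance state cycles)

-- ===== LEMMAS AND PROOFS =====

-- The neighbour window of a valid index: the in-range indices among z-1, z, z+1.
def W (n z : Nat) : List Nat :=
  (if 1 <= z then [z - 1] else []) ++ [z] ++ (if z + 1 < n then [z + 1] else [])

def indC (r : List String) (x1 : Nat) : Int := if r.getD x1 "" = "#" then 1 else 0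
def rowS (r : List String) (x : Nat) : Int := ((W r.length x).map (indC r)).sum
def planeS (p : List (List String)) (y x : Nat) : Int :=
  ((W p.length y).map (fun (y1 : Nat) => rowS (p.getD y1 []) x)).sum
def cubeS (g : List (List (List String))) (z y x : Nat) : Int :=
  ((W g.length z).map (fun (z1 : Nat) => planeS (g.getD z1 []) y x)).sum

def RectD (g : List (List (List String))) (ny nx : Nat) : Prop :=
  ∀ p ∈ g, p.length = ny ∧ ∀ r ∈ p, r.length = nx

-- A-side per-offset contribution functions (cX/cY/cZ carry the centre skip, pX/pY/pZ do not).
def pX (g : List (List (List String))) (x z1 y1 : Int) (dx : Int) : Int :=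
  if x + dx < 0 ∨ (((g.headD []).headD []).length : Int) ≤ x + dx then 0
  else if PySem.List.pyGetD (PySem.List.pyGetD (PySem.List.pyGetD g z1 []) y1 []) (x + dx) "" = "#" then 1 else 0
def cX (g : List (List (List String))) (x : Int) (dz dy z1 y1 : Int) (dx : Int) : Int :=
  if x + dx < 0 ∨ (((g.headD []).headD []).length : Int) ≤ x + dx then 0
  else if dx = 0 ∧ dy = 0 ∧ dz = 0 then 0
  else if PySem.List.pyGetD (PySem.List.pyGetD (PySem.List.pyGetD g z1 []) y1 []) (x + dx) "" = "#" then 1 else 0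
def pY (g : List (List (List String))) (x y z1 : Int) (dy : Int) : Int :=
  if y + dy < 0 ∨ ((g.headD []).length : Int) ≤ y + dy then 0
  else ([-1, 0, 1].map (pX g x z1 (y + dy))).sum
def cY (g : List (List (List String))) (x y : Int) (dz z1 : Int) (dy : Int) : Int :=
  if y + dy < 0 ∨ ((g.headD []).length : Int) ≤ y + dy then 0
  else ([-1, 0, 1].map (cX g x dz dy z1 (y + dy))).sum
def pZ (g : List (List (List String))) (x y z : Int) (dz : Int) : Int :=
  if z + dz < 0 ∨ (g.length : Int) ≤ z + dz then 0
  else ([-1, 0, 1].map (pY g x y (z + dz))).sum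
def cZ (g : List (List (List String))) (x y z : Int) (dz : Int) : Int :=
  if z + dz < 0 ∨ (g.length : Int) ≤ z + dz then 0
  else ([-1, 0, 1].map (cY g x y dz (z + dz))).sum

theorem pyRangeNeg : PySem.List.pyRange (-1) 2 1 = [-1, 0, 1] := by decide

theorem foldl_contrib {l : List Int} (f : Int → Int → Int) (c : Int → Int)
    (h : ∀ a d, f a d = a + c d) (a : Int) : l.foldl f a = a + (l.map c).sum := by
  have hf : f = fun a d => a + c d := funext fun a => funext fun d => h a d
  rw [hf]; exact PySem.List.foldl_add l c a

theorem cntA_eq_sum (g : List (List (List String))) (x y z : Int) :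
    cntA x y z g = ([-1, 0, 1].map (cZ g x y z)).sum := by
  unfold cntA
  rw [pyRangeNeg]
  refine (foldl_contrib _ (cZ g x y z) ?_ 0).trans (zero_add _)
  intro a dz
  unfold cZ
  split_ifs with h
  · ring
  · refine foldl_contrib _ (cY g x y dz (z + dz)) ?_ a
    intro a dy
    unfold cY
    split_ifs with h2
    · ring
    · refine foldl_contrib _ (cX g x dz dy (z + dz) (y + dy)) ?_ a
      intro a dx
      unfold cX
      split_ifs <;> ring

theorem cX_off (g : List (List (List String))) (x dz dy z1 y1 : Int) (h : ¬(dz = 0 ∧ dy = 0)) :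
    cX g x dz dy z1 y1 = pX g x z1 y1 := by
  funext dx
  unfold cX pX
  have hc : ¬(dx = 0 ∧ dy = 0 ∧ dz = 0) := fun hh => h ⟨hh.2.2, hh.2.1⟩
  simp [hc]

theorem cY_off (g : List (List (List String))) (x y dz z1 dy : Int) (h : dz ≠ 0) :
    cY g x y dz z1 dy = pY g x y z1 dy := by
  unfold cY pY
  rw [cX_off g x dz dy z1 (y + dy) (fun hh => h hh.1)]

theorem cY_center_ne (g : List (List (List String))) (x y z1 dy : Int) (h : dy ≠ 0) :
    cY g x y 0 z1 dy = pY g x y z1 dy := by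
  unfold cY pY
  rw [cX_off g x 0 dy z1 (y + dy) (fun hh => h hh.2)]

theorem cY_center (g : List (List (List String))) (x y z1 : Int)
    (hx : 0 ≤ x ∧ x < (((g.headD []).headD []).length : Int))
    (hy : 0 ≤ y ∧ y < ((g.headD []).length : Int)) :
    cY g x y 0 z1 0
      = pY g x y z1 0
        - (if PySem.List.pyGetD (PySem.List.pyGetD (PySem.List.pyGetD g z1 []) y []) x "" = "#" then 1 else 0) := by
  unfold cY pY
  have hgy : ¬(y + 0 < 0 ∨ ((g.headD []).length : Int) ≤ y + 0) := by omega
  rw [if_neg hgy, if_neg hgy]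
  simp only [List.map_cons, List.map_nil, List.sum_cons, List.sum_nil]
  unfold cX pX
  rw [if_pos (show (0:Int) = 0 ∧ (0:Int) = 0 ∧ (0:Int) = 0 from ⟨rfl, rfl, rfl⟩)]
  rw [if_neg (show ¬((-1:Int) = 0 ∧ (0:Int) = 0 ∧ (0:Int) = 0) from fun h => by norm_num at h)]
  rw [if_neg (show ¬((1:Int) = 0 ∧ (0:Int) = 0 ∧ (0:Int) = 0) from fun h => by norm_num at h)]
  simp only [add_zero]
  have hgx : ¬(x < 0 ∨ (((g.headD []).headD []).length : Int) ≤ x) := by omega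
  rw [if_neg hgx, if_neg hgx]
  ring

theorem cZ_off (g : List (List (List String))) (x y z dz : Int) (h : dz ≠ 0) :
    cZ g x y z dz = pZ g x y z dz := by
  unfold cZ pZ
  split_ifs with hg
  · rfl
  · simp only [List.map_cons, List.map_nil, List.sum_cons, List.sum_nil]
    rw [cY_off g x y dz (z + dz) (-1) h, cY_off g x y dz (z + dz) 0 h,
        cY_off g x y dz (z + dz) 1 h]

theorem cZ_center (g : List (List (List String))) (x y z : Int)
    (hx : 0 ≤ x ∧ x < (((g.headD []).headD []).length : Int))
    (hy : 0 ≤ y ∧ y < ((g.headD []).length : Int))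
    (hz : 0 ≤ z ∧ z < (g.length : Int)) :
    cZ g x y z 0
      = pZ g x y z 0
        - (if PySem.List.pyGetD (PySem.List.pyGetD (PySem.List.pyGetD g z []) y []) x "" = "#" then 1 else 0) := by
  unfold cZ pZ
  have hgz : ¬(z + 0 < 0 ∨ (g.length : Int) ≤ z + 0) := by omega
  rw [if_neg hgz, if_neg hgz]
  simp only [add_zero]
  simp only [List.map_cons, List.map_nil, List.sum_cons, List.sum_nil]
  rw [cY_center_ne g x y z (-1) (by norm_num), cY_center_ne g x y z 1 (by norm_num),
      cY_center g x y z hx hy]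
  ring

theorem sum_cZ_eq (g : List (List (List String))) (x y z : Int)
    (hx : 0 ≤ x ∧ x < (((g.headD []).headD []).length : Int))
    (hy : 0 ≤ y ∧ y < ((g.headD []).length : Int))
    (hz : 0 ≤ z ∧ z < (g.length : Int)) :
    ([-1, 0, 1].map (cZ g x y z)).sum
      = ([-1, 0, 1].map (pZ g x y z)).sum
        - (if PySem.List.pyGetD (PySem.List.pyGetD (PySem.List.pyGetD g z []) y []) x "" = "#" then 1 else 0) := by
  simp only [List.map_cons, List.map_nil, List.sum_cons, List.sum_nil]
  rw [cZ_off g x y z (-1) (by norm_num), cZ_off g x y z 1 (by norm_num),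
      cZ_center g x y z hx hy hz]
  ring

theorem axisW (f : Int → Int) (n z : Nat) (hz : z < n) :
    ([-1, 0, 1].map (fun d => if (z : Int) + d < 0 ∨ (n : Int) ≤ (z : Int) + d then 0 else f ((z : Int) + d))).sum
      = ((W n z).map (fun (i : Nat) => f (i : Int))).sum := by
  have hz' : (z : Int) < (n : Int) := by exact_mod_cast hz
  unfold W
  simp only [List.map_cons, List.map_nil, List.sum_cons, List.sum_nil]
  by_cases h1 : 1 ≤ z
  · rw [if_pos h1]
    have e1 : ((z - 1 : Nat) : Int) = (z : Int) + -1 := by omega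
    rw [if_neg (show ¬((z : Int) + -1 < 0 ∨ (n : Int) ≤ (z : Int) + -1) by omega),
        if_neg (show ¬((z : Int) + 0 < 0 ∨ (n : Int) ≤ (z : Int) + 0) by omega)]
    by_cases h2 : z + 1 < n
    · have h2' : (z : Int) + 1 < (n : Int) := by exact_mod_cast h2
      rw [if_pos h2, if_neg (show ¬((z : Int) + 1 < 0 ∨ (n : Int) ≤ (z : Int) + 1) by omega)]
      have e2 : ((z + 1 : Nat) : Int) = (z : Int) + 1 := by push_cast; ring
      simp only [List.map_append, List.map_cons, List.map_nil, List.sum_append,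
        List.sum_cons, List.sum_nil, e1, e2, add_zero]
      ring
    · have h2' : (n : Int) ≤ (z : Int) + 1 := by
        have : n ≤ z + 1 := by omega
        exact_mod_cast this
      rw [if_neg h2, if_pos (show (z : Int) + 1 < 0 ∨ (n : Int) ≤ (z : Int) + 1 from Or.inr h2')]
      simp only [List.map_append, List.map_cons, List.map_nil, List.sum_append,
        List.sum_cons, List.sum_nil, e1, add_zero]
  · have hz0 : (z : Int) = 0 := by omega
    rw [if_neg h1]
    rw [if_pos (show (z : Int) + -1 < 0 ∨ (n : Int) ≤ (z : Int) + -1 from Or.inl (by omega)),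
        if_neg (show ¬((z : Int) + 0 < 0 ∨ (n : Int) ≤ (z : Int) + 0) by omega)]
    by_cases h2 : z + 1 < n
    · have h2' : (z : Int) + 1 < (n : Int) := by exact_mod_cast h2
      rw [if_pos h2, if_neg (show ¬((z : Int) + 1 < 0 ∨ (n : Int) ≤ (z : Int) + 1) by omega)]
      have e2 : ((z + 1 : Nat) : Int) = (z : Int) + 1 := by push_cast; ring
      simp only [List.map_append, List.map_cons, List.map_nil, List.sum_append,
        List.sum_cons, List.sum_nil, e2, add_zero]
      ring
    · have h2' : (n : Int) ≤ (z : Int) + 1 := by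
        have : n ≤ z + 1 := by omega
        exact_mod_cast this
      rw [if_neg h2, if_pos (show (z : Int) + 1 < 0 ∨ (n : Int) ≤ (z : Int) + 1 from Or.inr h2')]
      simp only [List.map_append, List.map_cons, List.map_nil, List.sum_append,
        List.sum_cons, List.sum_nil, add_zero]

theorem W_lt {n z i : Nat} (hz : z < n) (hi : i ∈ W n z) : i < n := by
  unfold W at hi
  by_cases h1 : 1 ≤ z <;> by_cases h2 : z + 1 < n <;> simp [h1, h2] at hi <;> omega

theorem sum_pZ_eq (g : List (List (List String))) (ny nx : Nat)
    (hrect : RectD g ny nx) (hny : (g.headD []).length = ny) (hnx : ((g.headD []).headD []).length = nx)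
    (z y x : Nat) (hz : z < g.length) (hy : y < ny) (hx : x < nx) :
    ([-1, 0, 1].map (pZ g (x : Int) (y : Int) (z : Int))).sum = cubeS g z y x := by
  have h1 : ([-1, 0, 1].map (pZ g (x : Int) (y : Int) (z : Int))).sum
      = ((W g.length z).map (fun (z1 : Nat) => ([-1, 0, 1].map (pY g (x : Int) (y : Int) (z1 : Int))).sum)).sum :=
    Eq.trans (congrArg List.sum (List.map_congr_left fun d _ => rfl))
      (axisW (fun w => ([-1, 0, 1].map (pY g (x : Int) (y : Int) w)).sum) g.length z hz)
  rw [h1]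
  unfold cubeS
  refine congrArg List.sum (List.map_congr_left ?_)
  intro z1 hz1
  have hz1' : z1 < g.length := W_lt hz hz1
  have hpe : g.getD z1 [] = g[z1] := List.getD_eq_getElem g [] hz1'
  have hp : g.getD z1 [] ∈ g := by rw [hpe]; exact List.getElem_mem hz1'
  have hpl : (g.getD z1 []).length = ny := (hrect _ hp).1
  have hy' : y < (g.headD []).length := by rw [hny]; exact hy
  have h2 : ([-1, 0, 1].map (pY g (x : Int) (y : Int) (z1 : Int))).sum
      = ((W (g.headD []).length y).map (fun (y1 : Nat) => ([-1, 0, 1].map (pX g (x : Int) (z1 : Int) (y1 : Int))).sum)).sum :=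
    Eq.trans (congrArg List.sum (List.map_congr_left fun d _ => rfl))
      (axisW (fun w => ([-1, 0, 1].map (pX g (x : Int) (z1 : Int) w)).sum) (g.headD []).length y hy')
  rw [h2]
  unfold planeS
  rw [hpl, hny]
  refine congrArg List.sum (List.map_congr_left ?_)
  intro y1 hy1
  have hy1' : y1 < ny := W_lt hy hy1
  have hre : (g.getD z1 []).getD y1 [] = (g.getD z1 [])[y1] :=
    List.getD_eq_getElem _ [] (by omega)
  have hr : (g.getD z1 []).getD y1 [] ∈ g.getD z1 [] := by
    rw [hre]; exact List.getElem_mem (by omega)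
  have hrl : ((g.getD z1 []).getD y1 []).length = nx := (hrect _ hp).2 _ hr
  have hx' : x < ((g.headD []).headD []).length := by rw [hnx]; exact hx
  have h3 : ([-1, 0, 1].map (pX g (x : Int) (z1 : Int) (y1 : Int))).sum
      = ((W ((g.headD []).headD []).length x).map (fun (x1 : Nat) =>
          if PySem.List.pyGetD (PySem.List.pyGetD (PySem.List.pyGetD g (z1 : Int) []) (y1 : Int) []) (x1 : Int) "" = "#"
          then (1 : Int) else 0)).sum :=
    Eq.trans (congrArg List.sum (List.map_congr_left fun d _ => rfl))
      (axisW (fun w => if PySem.List.pyGetD (PySem.List.pyGetD (PySem.List.pyGetD g (z1 : Int) []) (y1 : Int) []) w "" = "#" then (1 : Int) else 0)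
        ((g.headD []).headD []).length x hx')
  rw [h3]
  unfold rowS
  rw [hrl, hnx]
  refine congrArg List.sum (List.map_congr_left ?_)
  intro x1 hx1
  simp [indC, PySem.List.pyGetD_natCast]

theorem cntA_canon (g : List (List (List String))) (ny nx : Nat)
    (hrect : RectD g ny nx) (hny : (g.headD []).length = ny) (hnx : ((g.headD []).headD []).length = nx)
    (z y x : Nat) (hz : z < g.length) (hy : y < ny) (hx : x < nx) :
    cntA (x : Int) (y : Int) (z : Int) g
      = cubeS g z y x - (if ((g.getD z []).getD y []).getD x "" = "#" then 1 else 0) := by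
  rw [cntA_eq_sum]
  rw [sum_cZ_eq g (x : Int) (y : Int) (z : Int)
      (⟨Int.natCast_nonneg x, by rw [hnx]; exact_mod_cast hx⟩)
      (⟨Int.natCast_nonneg y, by rw [hny]; exact_mod_cast hy⟩)
      (⟨Int.natCast_nonneg z, by exact_mod_cast hz⟩)]
  rw [sum_pZ_eq g ny nx hrect hny hnx z y x hz hy hx]
  simp [PySem.List.pyGetD_natCast]

theorem headD_eq_getD {α : Type} (l : List α) (d : α) : l.headD d = l.getD 0 d := by
  cases l <;> rfl

-- ===== scatter side =====
-- the 26 neighbour offsets in the order B's triple loop visits them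
def offs26 : List (Int × Int × Int) :=
  ([-1, 0, 1] : List Int).flatMap (fun dz =>
    ([-1, 0, 1] : List Int).flatMap (fun dy =>
      (([-1, 0, 1] : List Int).filter (fun dx => decide (¬(dz = 0 ∧ dy = 0 ∧ dx = 0)))).map (fun dx => (dz, dy, dx))))

def keysOf (z y x : Int) : List (Int × Int × Int) := offs26.map (fun e => (z + e.1, y + e.2.1, x + e.2.2))

def bump (d : PySem.Dict (Int × Int × Int) Int) (k : Int × Int × Int) : PySem.Dict (Int × Int × Int) Int :=
  d.insert k (d.getD k 0 + 1)

-- the multiset of keys B's scatter pass bumps, as a flat list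
def scatterKeys (g : List (List (List String))) : List (Int × Int × Int) :=
  (PySem.List.enumerate g 0).flatMap (fun zp =>
    (PySem.List.enumerate zp.2 0).flatMap (fun yp =>
      (PySem.List.enumerate yp.2 0).flatMap (fun xc =>
        if xc.2 = "#" then keysOf zp.1 yp.1 xc.1 else [])))

-- the (bounds-checked) activity indicator of an Int coordinate, with each plane's/row's own length
def cellInd (g : List (List (List String))) (k : Int × Int × Int) : Int :=
  if 0 ≤ k.1 ∧ k.1 < (g.length : Int) ∧
     0 ≤ k.2.1 ∧ k.2.1 < ((g.getD k.1.toNat []).length : Int) ∧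
     0 ≤ k.2.2 ∧ k.2.2 < (((g.getD k.1.toNat []).getD k.2.1.toNat []).length : Int) ∧
     ((g.getD k.1.toNat []).getD k.2.1.toNat []).getD k.2.2.toNat "" = "#"
  then 1 else 0

theorem foldl_foldl_flatMap {α K D : Type} (f : D → K → D) (ks : α → List K) (l : List α) (d : D) :
    l.foldl (fun d a => (ks a).foldl f d) d = (l.flatMap ks).foldl f d := by
  induction l generalizing d with
  | nil => rfl
  | cons a t ih => simp only [List.foldl_cons, List.flatMap_cons, List.foldl_append, ih]

theorem offs_fold (z y x : Int) (d : PySem.Dict (Int × Int × Int) Int) :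
    ([-1, 0, 1] : List Int).foldl (fun d dz =>
      ([-1, 0, 1] : List Int).foldl (fun d dy =>
        ([-1, 0, 1] : List Int).foldl (fun d dx =>
          if ¬(dz = 0 ∧ dy = 0 ∧ dx = 0) then
            d.insert (z + dz, y + dy, x + dx) (d.getD (z + dz, y + dy, x + dx) 0 + 1)
          else d) d) d) d
    = (keysOf z y x).foldl bump d := by
  have h1 : ∀ (dz dy : Int) (d : PySem.Dict (Int × Int × Int) Int),
      ([-1, 0, 1] : List Int).foldl (fun d dx =>
        if ¬(dz = 0 ∧ dy = 0 ∧ dx = 0) then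
          d.insert (z + dz, y + dy, x + dx) (d.getD (z + dz, y + dy, x + dx) 0 + 1)
        else d) d
      = ((([-1, 0, 1] : List Int).filter (fun dx => decide (¬(dz = 0 ∧ dy = 0 ∧ dx = 0)))).map
          (fun dx => ((z + dz, y + dy, x + dx) : Int × Int × Int))).foldl bump d := by
    intro dz dy d
    rw [PySem.List.foldl_ite_eq_foldl_filter (p := fun dx => ¬(dz = 0 ∧ dy = 0 ∧ dx = 0))]
    rw [List.foldl_map]
    rfl
  have h2 : ∀ (dz : Int) (d : PySem.Dict (Int × Int × Int) Int),
      ([-1, 0, 1] : List Int).foldl (fun d dy =>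
        ((([-1, 0, 1] : List Int).filter (fun dx => decide (¬(dz = 0 ∧ dy = 0 ∧ dx = 0)))).map
          (fun dx => ((z + dz, y + dy, x + dx) : Int × Int × Int))).foldl bump d) d
      = (([-1, 0, 1] : List Int).flatMap (fun dy =>
          ((([-1, 0, 1] : List Int).filter (fun dx => decide (¬(dz = 0 ∧ dy = 0 ∧ dx = 0)))).map
            (fun dx => ((z + dz, y + dy, x + dx) : Int × Int × Int))))).foldl bump d := by
    intro dz d
    exact foldl_foldl_flatMap bump _ _ d
  simp only [h1, h2]
  rw [foldl_foldl_flatMap bump]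
  congr 1

theorem scatterB_keys (g : List (List (List String))) :
    scatterB g = (scatterKeys g).foldl bump PySem.Dict.empty := by
  unfold scatterB scatterKeys
  simp only [offs_fold]
  have hif : ∀ (b : Prop) [Decidable b] (l : List (Int × Int × Int)) (d : PySem.Dict (Int × Int × Int) Int),
      (if b then l.foldl bump d else d) = (if b then l else []).foldl bump d := by
    intro b _ l d; split_ifs <;> rfl
  simp only [hif]
  have hx : ∀ (zp : Int × List (List String)) (yp : Int × List String) (d : PySem.Dict (Int × Int × Int) Int),
      (PySem.List.enumerate yp.2 0).foldl (fun d xc =>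
        ((if xc.2 = "#" then keysOf zp.1 yp.1 xc.1 else []).foldl bump d)) d
      = ((PySem.List.enumerate yp.2 0).flatMap (fun xc =>
          if xc.2 = "#" then keysOf zp.1 yp.1 xc.1 else [])).foldl bump d :=
    fun zp yp d => foldl_foldl_flatMap bump _ _ d
  simp only [hx]
  have hy : ∀ (zp : Int × List (List String)) (d : PySem.Dict (Int × Int × Int) Int),
      (PySem.List.enumerate zp.2 0).foldl (fun d yp =>
        ((PySem.List.enumerate yp.2 0).flatMap (fun xc =>
          if xc.2 = "#" then keysOf zp.1 yp.1 xc.1 else [])).foldl bump d) d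
      = ((PySem.List.enumerate zp.2 0).flatMap (fun yp =>
          (PySem.List.enumerate yp.2 0).flatMap (fun xc =>
            if xc.2 = "#" then keysOf zp.1 yp.1 xc.1 else []))).foldl bump d :=
    fun zp d => foldl_foldl_flatMap bump _ _ d
  simp only [hy]
  exact foldl_foldl_flatMap bump _ _ _

theorem getD_scatterB (g : List (List (List String))) (t : Int × Int × Int) :
    (scatterB g).getD t 0 = ((scatterKeys g).count t : Int) := by
  rw [scatterB_keys]
  have := PySem.Dict.getD_foldl_insert_add_one (scatterKeys g) (PySem.Dict.empty) t
  simpa [bump, PySem.Dict.getD_empty] using this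

theorem sum_map_flatMap {α β : Type} (l : List α) (f : α → List β) (F : β → Int) :
    ((l.flatMap f).map F).sum = (l.map (fun a => ((f a).map F).sum)).sum := by
  rw [List.map_flatMap, List.flatMap_def, List.sum_flatten, List.map_map]; rfl

theorem sum_swap {α β : Type} (l1 : List α) (l2 : List β) (f : α → β → Int) :
    (l1.map (fun a => (l2.map (f a)).sum)).sum = (l2.map (fun b => (l1.map (fun a => f a b)).sum)).sum := by
  induction l1 with
  | nil => simp
  | cons a t ih => simp only [List.map_cons, List.sum_cons, ih, ← PySem.List.sum_map_add_int]

theorem sum_map_sub {α : Type} (l : List α) (f g : α → Int) :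
    (l.map (fun a => f a - g a)).sum = (l.map f).sum - (l.map g).sum := by
  induction l with
  | nil => simp
  | cons a t ih => simp only [List.map_cons, List.sum_cons, ih]; ring

theorem gate_sum {α : Type} (b : Prop) [Decidable b] (l : List α) (f : α → Int) :
    (if b then (l.map f).sum else 0) = (l.map (fun a => if b then f a else 0)).sum := by
  split_ifs with hb
  · rfl
  · symm; apply List.sum_eq_zero; intro a ha; simp at ha; obtain ⟨_, _, rfl⟩ := ha; rfl

theorem sum_single (f : Nat → Int) (n : Nat) (a : Int) :
    ((List.range n).map (fun (i : Nat) => if (i : Int) = a then f i else 0)).sum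
      = if 0 ≤ a ∧ a < (n : Int) then f a.toNat else 0 := by
  induction n with
  | zero =>
    simp only [List.range_zero, List.map_nil, List.sum_nil, Nat.cast_zero]
    rw [if_neg (by omega)]
  | succ n ih =>
    rw [List.range_succ, List.map_append, List.sum_append, ih]
    simp only [List.map_cons, List.map_nil, List.sum_cons, List.sum_nil, add_zero]
    by_cases hna : (n : Int) = a
    · have h1 : ¬(0 ≤ a ∧ a < (n : Int)) := by omega
      have h2 : 0 ≤ a ∧ a < ((n + 1 : Nat) : Int) := by push_cast; omega
      have h3 : a.toNat = n := by omega
      simp [hna, h2, h3]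
    · rw [if_neg hna, add_zero]
      have h2 : (0 ≤ a ∧ a < ((n + 1 : Nat) : Int)) ↔ (0 ≤ a ∧ a < (n : Int)) := by push_cast; omega
      rw [if_congr h2 rfl rfl]

theorem sum_filter_ite {α : Type} (l : List α) (p : α → Prop) [DecidablePred p] (f : α → Int) :
    ((l.filter (fun a => decide (p a))).map f).sum = (l.map (fun a => if p a then f a else 0)).sum := by
  induction l with
  | nil => rfl
  | cons a tl ih => by_cases h : p a <;> simp [h, ih]

theorem count_as_sum {α : Type} [BEq α] [LawfulBEq α] [DecidableEq α] (l : List α) (t : α) :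
    (l.count t : Int) = (l.map (fun j => if j = t then (1 : Int) else 0)).sum := by
  have h : (fun (j : α) => if j = t then (1 : Int) else 0) = (fun j => if (j == t) = true then (1 : Int) else 0) := by
    funext j; simp
  rw [h, PySem.List.sum_map_ite_one_zero]
  norm_num [List.count_eq_countP]

theorem scatter_sum_offs (g : List (List (List String))) (t : Int × Int × Int) :
    ((scatterKeys g).map (fun j => if j = t then (1 : Int) else 0)).sum
      = (offs26.map (fun e =>
          ((PySem.List.enumerate g 0).map (fun zp =>
            ((PySem.List.enumerate zp.2 0).map (fun yp =>
              ((PySem.List.enumerate yp.2 0).map (fun xc =>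
                if xc.2 = "#" ∧ ((zp.1 + e.1, yp.1 + e.2.1, xc.1 + e.2.2) : Int × Int × Int) = t then (1 : Int) else 0)).sum)).sum)).sum)).sum := by
  have hcell : ∀ (a b c : Int) (s : String),
      ((if s = "#" then keysOf a b c else []).map (fun j => if j = t then (1 : Int) else 0)).sum
        = (offs26.map (fun e => if s = "#" ∧ ((a + e.1, b + e.2.1, c + e.2.2) : Int × Int × Int) = t then (1 : Int) else 0)).sum := by
    intro a b c s
    rw [apply_ite (fun l : List (Int × Int × Int) => (l.map (fun j => if j = t then (1 : Int) else 0)).sum)]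
    simp only [List.map_nil, List.sum_nil]
    rw [keysOf, List.map_map, gate_sum]
    refine congrArg List.sum (List.map_congr_left ?_)
    intro e _
    by_cases hs : s = "#" <;> simp [hs, Function.comp]
  unfold scatterKeys
  rw [sum_map_flatMap]
  have h1 : ((PySem.List.enumerate g 0).map (fun zp =>
        (((PySem.List.enumerate zp.2 0).flatMap (fun yp => (PySem.List.enumerate yp.2 0).flatMap (fun xc => if xc.2 = "#" then keysOf zp.1 yp.1 xc.1 else []))).map (fun j => if j = t then (1 : Int) else 0)).sum)).sum
      = ((PySem.List.enumerate g 0).map (fun zp =>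
          ((PySem.List.enumerate zp.2 0).map (fun yp =>
            ((PySem.List.enumerate yp.2 0).map (fun xc =>
              (offs26.map (fun e => if xc.2 = "#" ∧ ((zp.1 + e.1, yp.1 + e.2.1, xc.1 + e.2.2) : Int × Int × Int) = t then (1 : Int) else 0)).sum)).sum)).sum)).sum := by
    refine congrArg List.sum (List.map_congr_left ?_)
    intro zp _
    rw [sum_map_flatMap]
    refine congrArg List.sum (List.map_congr_left ?_)
    intro yp _
    rw [sum_map_flatMap]
    refine congrArg List.sum (List.map_congr_left ?_)
    intro xc _
    exact hcell zp.1 yp.1 xc.1 xc.2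
  rw [h1]
  have h2 : ((PySem.List.enumerate g 0).map (fun zp =>
        ((PySem.List.enumerate zp.2 0).map (fun yp =>
          ((PySem.List.enumerate yp.2 0).map (fun xc =>
            (offs26.map (fun e => if xc.2 = "#" ∧ ((zp.1 + e.1, yp.1 + e.2.1, xc.1 + e.2.2) : Int × Int × Int) = t then (1 : Int) else 0)).sum)).sum)).sum)).sum
      = ((PySem.List.enumerate g 0).map (fun zp =>
          (offs26.map (fun e =>
            ((PySem.List.enumerate zp.2 0).map (fun yp =>
              ((PySem.List.enumerate yp.2 0).map (fun xc =>
                if xc.2 = "#" ∧ ((zp.1 + e.1, yp.1 + e.2.1, xc.1 + e.2.2) : Int × Int × Int) = t then (1 : Int) else 0)).sum)).sum)).sum)).sum := by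
    refine congrArg List.sum (List.map_congr_left ?_)
    intro zp _
    have hswx : ((PySem.List.enumerate zp.2 0).map (fun yp =>
          ((PySem.List.enumerate yp.2 0).map (fun xc =>
            (offs26.map (fun e => if xc.2 = "#" ∧ ((zp.1 + e.1, yp.1 + e.2.1, xc.1 + e.2.2) : Int × Int × Int) = t then (1 : Int) else 0)).sum)).sum)).sum
        = ((PySem.List.enumerate zp.2 0).map (fun yp =>
            (offs26.map (fun e =>
              ((PySem.List.enumerate yp.2 0).map (fun xc =>
                if xc.2 = "#" ∧ ((zp.1 + e.1, yp.1 + e.2.1, xc.1 + e.2.2) : Int × Int × Int) = t then (1 : Int) else 0)).sum)).sum)).sum := by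
      refine congrArg List.sum (List.map_congr_left ?_)
      intro yp _
      exact sum_swap (PySem.List.enumerate yp.2 0) offs26 _
    rw [hswx]
    exact sum_swap (PySem.List.enumerate zp.2 0) offs26 _
  rw [h2]
  exact sum_swap (PySem.List.enumerate g 0) offs26 _

theorem collapse_e (g : List (List (List String))) (z y x : Nat) (e : Int × Int × Int) :
    ((PySem.List.enumerate g 0).map (fun zp =>
      ((PySem.List.enumerate zp.2 0).map (fun yp =>
        ((PySem.List.enumerate yp.2 0).map (fun xc =>
          if xc.2 = "#" ∧ ((zp.1 + e.1, yp.1 + e.2.1, xc.1 + e.2.2) : Int × Int × Int) = ((z : Int), (y : Int), (x : Int)) then (1 : Int) else 0)).sum)).sum)).sum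
      = cellInd g ((z : Int) - e.1, (y : Int) - e.2.1, (x : Int) - e.2.2) := by
  have hxcol : ∀ (z1 y1 : Nat),
      ((PySem.List.enumerate ((g.getD z1 []).getD y1 []) 0).map (fun xc =>
        if xc.2 = "#" ∧ (((z1 : Int) + e.1, (y1 : Int) + e.2.1, xc.1 + e.2.2) : Int × Int × Int) = ((z : Int), (y : Int), (x : Int)) then (1 : Int) else 0)).sum
      = if 0 ≤ (x : Int) - e.2.2 ∧ (x : Int) - e.2.2 < ((((g.getD z1 []).getD y1 []) : List String).length : Int) then
          (if ((g.getD z1 []).getD y1 []).getD ((x : Int) - e.2.2).toNat "" = "#" ∧ (z1 : Int) + e.1 = (z : Int) ∧ (y1 : Int) + e.2.1 = (y : Int) then (1 : Int) else 0)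
        else 0 := by
    intro z1 y1
    set r := (g.getD z1 []).getD y1 [] with hr
    rw [PySem.List.enumerate_eq_map_pyRange r ""]
    simp only [PySem.List.len_eq]
    rw [PySem.List.pyRange_zero_nat r.length, List.map_map, List.map_map]
    refine Eq.trans (congrArg List.sum (List.map_congr_left ?_))
      (sum_single (fun x1 => if r.getD x1 "" = "#" ∧ (z1 : Int) + e.1 = (z : Int) ∧ (y1 : Int) + e.2.1 = (y : Int) then (1 : Int) else 0) r.length ((x : Int) - e.2.2))
    intro x1 _
    simp only [Function.comp_apply, PySem.List.pyGetD_natCast]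
    by_cases hxe : ((x1 : Nat) : Int) = (x : Int) - e.2.2
    · rw [if_pos hxe]
      refine if_congr ?_ rfl rfl
      rw [Prod.mk.injEq, Prod.mk.injEq]
      constructor
      · rintro ⟨hc, h1, h2, h3⟩; exact ⟨hc, h1, h2⟩
      · rintro ⟨hc, h1, h2⟩; exact ⟨hc, h1, h2, by omega⟩
    · rw [if_neg hxe, if_neg]
      rw [Prod.mk.injEq, Prod.mk.injEq]
      rintro ⟨hc, h1, h2, h3⟩
      omega
  have hycol : ∀ (z1 : Nat),
      ((PySem.List.enumerate (g.getD z1 []) 0).map (fun yp =>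
        ((PySem.List.enumerate yp.2 0).map (fun xc =>
          if xc.2 = "#" ∧ (((z1 : Int) + e.1, yp.1 + e.2.1, xc.1 + e.2.2) : Int × Int × Int) = ((z : Int), (y : Int), (x : Int)) then (1 : Int) else 0)).sum)).sum
      = if 0 ≤ (y : Int) - e.2.1 ∧ (y : Int) - e.2.1 < ((g.getD z1 []).length : Int) then
          (if 0 ≤ (x : Int) - e.2.2 ∧ (x : Int) - e.2.2 < (((g.getD z1 []).getD ((y : Int) - e.2.1).toNat []).length : Int) then
            (if ((g.getD z1 []).getD ((y : Int) - e.2.1).toNat []).getD ((x : Int) - e.2.2).toNat "" = "#" ∧ (z1 : Int) + e.1 = (z : Int) then (1 : Int) else 0)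
          else 0)
        else 0 := by
    intro z1
    set p := g.getD z1 [] with hp
    rw [PySem.List.enumerate_eq_map_pyRange p []]
    simp only [PySem.List.len_eq]
    rw [PySem.List.pyRange_zero_nat p.length, List.map_map, List.map_map]
    refine Eq.trans (congrArg List.sum (List.map_congr_left ?_))
      (sum_single (fun y1 => if 0 ≤ (x : Int) - e.2.2 ∧ (x : Int) - e.2.2 < ((p.getD y1 []).length : Int) then
          (if (p.getD y1 []).getD ((x : Int) - e.2.2).toNat "" = "#" ∧ (z1 : Int) + e.1 = (z : Int) then (1 : Int) else 0)
        else 0) p.length ((y : Int) - e.2.1))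
    intro y1 _
    simp only [Function.comp_apply, PySem.List.pyGetD_natCast]
    rw [hxcol z1 y1]
    by_cases hye : ((y1 : Nat) : Int) = (y : Int) - e.2.1
    · rw [if_pos hye]
      simp only [← hp]
      refine if_congr Iff.rfl (if_congr ?_ rfl rfl) rfl
      constructor
      · rintro ⟨hc, h1, h2⟩; exact ⟨hc, h1⟩
      · rintro ⟨hc, h1⟩; exact ⟨hc, h1, by omega⟩
    · rw [if_neg hye]
      split_ifs with h1 h2
      · exact absurd h2.2.2 (by omega)
      · rfl
      · rfl
  rw [PySem.List.enumerate_eq_map_pyRange g []]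
  simp only [PySem.List.len_eq]
  rw [PySem.List.pyRange_zero_nat g.length, List.map_map, List.map_map]
  have hfin := sum_single (fun z1 => if 0 ≤ (y : Int) - e.2.1 ∧ (y : Int) - e.2.1 < ((g.getD z1 []).length : Int) then
        (if 0 ≤ (x : Int) - e.2.2 ∧ (x : Int) - e.2.2 < (((g.getD z1 []).getD ((y : Int) - e.2.1).toNat []).length : Int) then
          (if ((g.getD z1 []).getD ((y : Int) - e.2.1).toNat []).getD ((x : Int) - e.2.2).toNat "" = "#" then (1 : Int) else 0)
        else 0)
      else 0) g.length ((z : Int) - e.1)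
  refine Eq.trans (Eq.trans (congrArg List.sum (List.map_congr_left ?_)) hfin) ?_
  · intro z1 _
    simp only [Function.comp_apply, PySem.List.pyGetD_natCast]
    rw [hycol z1]
    by_cases hze : ((z1 : Nat) : Int) = (z : Int) - e.1
    · rw [if_pos hze]
      refine if_congr Iff.rfl (if_congr Iff.rfl (if_congr ?_ rfl rfl) rfl) rfl
      constructor
      · rintro ⟨hc, h1⟩; exact hc
      · intro hc; exact ⟨hc, by omega⟩
    · rw [if_neg hze]
      split_ifs with h1 h2 h3 <;> first | rfl | exact absurd h3.2 (by omega)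
  · unfold cellInd
    split_ifs <;> first | rfl | tauto

-- bounds-checked row indicator used to regroup cellInd sums
def rowInd (r : List String) (k : Int) : Int :=
  if 0 ≤ k ∧ k < (r.length : Int) ∧ r.getD k.toNat "" = "#" then 1 else 0

theorem cellInd_split (g : List (List (List String))) (k : Int × Int × Int) :
    cellInd g k = if 0 ≤ k.1 ∧ k.1 < (g.length : Int) then
        (if 0 ≤ k.2.1 ∧ k.2.1 < ((g.getD k.1.toNat []).length : Int) then
          rowInd ((g.getD k.1.toNat []).getD k.2.1.toNat []) k.2.2 else 0) else 0 := by
  unfold cellInd rowInd; split_ifs <;> tauto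

theorem axis_gate (f : Int → Int) (n z : Nat) (hz : z < n) :
    (([-1, 0, 1] : List Int).map (fun d => if 0 ≤ (z : Int) + d ∧ (z : Int) + d < (n : Int) then f ((z : Int) + d) else 0)).sum
      = ((W n z).map (fun (i : Nat) => f (i : Int))).sum := by
  rw [← axisW f n z hz]
  refine congrArg List.sum (List.map_congr_left ?_)
  intro d _
  split_ifs <;> first | rfl | omega

theorem triple_cellInd (g : List (List (List String))) (ny nx : Nat)
    (hrect : RectD g ny nx) (z y x : Nat) (hz : z < g.length) (hy : y < ny) (hx : x < nx) :
    (([-1, 0, 1] : List Int).map (fun dz =>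
      (([-1, 0, 1] : List Int).map (fun dy =>
        (([-1, 0, 1] : List Int).map (fun dx =>
          cellInd g ((z : Int) + dz, (y : Int) + dy, (x : Int) + dx))).sum)).sum)).sum
      = cubeS g z y x := by
  have hrow : ∀ (r : List String), x < r.length →
      (([-1, 0, 1] : List Int).map (fun dx => rowInd r ((x : Int) + dx))).sum = rowS r x := by
    intro r hxr
    have hpt : ∀ dx : Int, dx ∈ ([-1, 0, 1] : List Int) →
        rowInd r ((x : Int) + dx)
          = if 0 ≤ (x : Int) + dx ∧ (x : Int) + dx < (r.length : Int) then
              (if r.getD ((x : Int) + dx).toNat "" = "#" then (1 : Int) else 0) else 0 := by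
      intro dx _
      unfold rowInd
      split_ifs <;> tauto
    rw [List.map_congr_left hpt]
    rw [axis_gate (fun w => if r.getD w.toNat "" = "#" then (1 : Int) else 0) r.length x hxr]
    unfold rowS
    refine congrArg List.sum (List.map_congr_left ?_)
    intro i _
    simp [indC]
  have h1 : ∀ dz : Int, dz ∈ ([-1, 0, 1] : List Int) →
      (([-1, 0, 1] : List Int).map (fun dy =>
        (([-1, 0, 1] : List Int).map (fun dx =>
          cellInd g ((z : Int) + dz, (y : Int) + dy, (x : Int) + dx))).sum)).sum
      = if 0 ≤ (z : Int) + dz ∧ (z : Int) + dz < (g.length : Int) then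
          (([-1, 0, 1] : List Int).map (fun dy =>
            if 0 ≤ (y : Int) + dy ∧ (y : Int) + dy < ((g.getD ((z : Int) + dz).toNat []).length : Int) then
              (([-1, 0, 1] : List Int).map (fun dx =>
                rowInd ((g.getD ((z : Int) + dz).toNat []).getD ((y : Int) + dy).toNat []) ((x : Int) + dx))).sum
            else 0)).sum
        else 0 := by
    intro dz _
    simp only [cellInd_split]
    have hdy : ∀ dy : Int, dy ∈ ([-1, 0, 1] : List Int) →
        (([-1, 0, 1] : List Int).map (fun dx =>
          if 0 ≤ (z : Int) + dz ∧ (z : Int) + dz < (g.length : Int) then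
            (if 0 ≤ (y : Int) + dy ∧ (y : Int) + dy < ((g.getD ((z : Int) + dz).toNat []).length : Int) then
              rowInd ((g.getD ((z : Int) + dz).toNat []).getD ((y : Int) + dy).toNat []) ((x : Int) + dx)
            else 0)
          else 0)).sum
        = if 0 ≤ (z : Int) + dz ∧ (z : Int) + dz < (g.length : Int) then
            (if 0 ≤ (y : Int) + dy ∧ (y : Int) + dy < ((g.getD ((z : Int) + dz).toNat []).length : Int) then
              (([-1, 0, 1] : List Int).map (fun dx =>
                rowInd ((g.getD ((z : Int) + dz).toNat []).getD ((y : Int) + dy).toNat []) ((x : Int) + dx))).sum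
            else 0)
          else 0 := by
      intro dy _
      rw [← gate_sum, ← gate_sum]
    rw [List.map_congr_left hdy]
    rw [← gate_sum]
  rw [List.map_congr_left h1]
  rw [axis_gate (fun w =>
      (([-1, 0, 1] : List Int).map (fun dy =>
        if 0 ≤ (y : Int) + dy ∧ (y : Int) + dy < ((g.getD w.toNat []).length : Int) then
          (([-1, 0, 1] : List Int).map (fun dx =>
            rowInd ((g.getD w.toNat []).getD ((y : Int) + dy).toNat []) ((x : Int) + dx))).sum
        else 0)).sum) g.length z hz]
  unfold cubeS
  refine congrArg List.sum (List.map_congr_left ?_)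
  intro z1 hz1
  have hz1' : z1 < g.length := W_lt hz hz1
  have hpe : g.getD z1 [] = g[z1] := List.getD_eq_getElem g [] hz1'
  have hp : g.getD z1 [] ∈ g := by rw [hpe]; exact List.getElem_mem hz1'
  have hpl : (g.getD z1 []).length = ny := (hrect _ hp).1
  simp only [Int.toNat_natCast]
  rw [axis_gate (fun w =>
      (([-1, 0, 1] : List Int).map (fun dx =>
        rowInd ((g.getD z1 []).getD w.toNat []) ((x : Int) + dx))).sum) (g.getD z1 []).length y (by omega)]
  unfold planeS
  refine congrArg List.sum (List.map_congr_left ?_)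
  intro y1 hy1
  have hy1' : y1 < (g.getD z1 []).length := W_lt (by omega) hy1
  have hre : (g.getD z1 []).getD y1 [] = (g.getD z1 [])[y1] := List.getD_eq_getElem _ [] hy1'
  have hrm : (g.getD z1 []).getD y1 [] ∈ g.getD z1 [] := by rw [hre]; exact List.getElem_mem hy1'
  have hrl : ((g.getD z1 []).getD y1 []).length = nx := (hrect _ hp).2 _ hrm
  simp only [Int.toNat_natCast]
  exact hrow _ (by omega)

theorem scatter_count (g : List (List (List String))) (ny nx : Nat)
    (hrect : RectD g ny nx) (hny : (g.headD []).length = ny) (hnx : ((g.headD []).headD []).length = nx)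
    (z y x : Nat) (hz : z < g.length) (hy : y < ny) (hx : x < nx) :
    (scatterB g).getD ((z : Int), (y : Int), (x : Int)) 0 = cntA (x : Int) (y : Int) (z : Int) g := by
  rw [getD_scatterB, count_as_sum, scatter_sum_offs]
  have hcol : ∀ e : Int × Int × Int, e ∈ offs26 →
      ((PySem.List.enumerate g 0).map (fun zp =>
        ((PySem.List.enumerate zp.2 0).map (fun yp =>
          ((PySem.List.enumerate yp.2 0).map (fun xc =>
            if xc.2 = "#" ∧ ((zp.1 + e.1, yp.1 + e.2.1, xc.1 + e.2.2) : Int × Int × Int) = ((z : Int), (y : Int), (x : Int)) then (1 : Int) else 0)).sum)).sum)).sum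
      = cellInd g ((z : Int) - e.1, (y : Int) - e.2.1, (x : Int) - e.2.2) := fun e _ => collapse_e g z y x e
  rw [List.map_congr_left hcol]
  -- flip the offsets: offs26 is closed under negation (it reverses the list)
  have hneg : offs26.map (fun e => ((-e.1, -e.2.1, -e.2.2) : Int × Int × Int)) = offs26.reverse := by decide
  have hflip : (offs26.map (fun e => cellInd g ((z : Int) - e.1, (y : Int) - e.2.1, (x : Int) - e.2.2))).sum
      = (offs26.map (fun e => cellInd g ((z : Int) + e.1, (y : Int) + e.2.1, (x : Int) + e.2.2))).sum := by
    have h1 : offs26.map (fun e => cellInd g ((z : Int) - e.1, (y : Int) - e.2.1, (x : Int) - e.2.2))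
        = (offs26.map (fun e => ((-e.1, -e.2.1, -e.2.2) : Int × Int × Int))).map
            (fun e => cellInd g ((z : Int) + e.1, (y : Int) + e.2.1, (x : Int) + e.2.2)) := by
      rw [List.map_map]
      refine List.map_congr_left ?_
      intro e _
      simp [sub_eq_add_neg]
    rw [h1, hneg, List.map_reverse, List.sum_reverse]
  rw [hflip]
  -- split the 26 offsets into the full 27-cube minus the centre
  have hsplit : (offs26.map (fun e => cellInd g ((z : Int) + e.1, (y : Int) + e.2.1, (x : Int) + e.2.2))).sum
      = (([-1, 0, 1] : List Int).map (fun dz =>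
          (([-1, 0, 1] : List Int).map (fun dy =>
            (([-1, 0, 1] : List Int).map (fun dx =>
              if ¬(dz = 0 ∧ dy = 0 ∧ dx = 0) then cellInd g ((z : Int) + dz, (y : Int) + dy, (x : Int) + dx) else 0)).sum)).sum)).sum := by
    unfold offs26
    rw [sum_map_flatMap]
    refine congrArg List.sum (List.map_congr_left ?_)
    intro dz _
    rw [sum_map_flatMap]
    refine congrArg List.sum (List.map_congr_left ?_)
    intro dy _
    rw [List.map_map]
    exact sum_filter_ite ([-1, 0, 1] : List Int) (fun dx => ¬(dz = 0 ∧ dy = 0 ∧ dx = 0)) _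
  rw [hsplit]
  have hpt : ∀ dz : Int, dz ∈ ([-1, 0, 1] : List Int) →
      (([-1, 0, 1] : List Int).map (fun dy =>
        (([-1, 0, 1] : List Int).map (fun dx =>
          if ¬(dz = 0 ∧ dy = 0 ∧ dx = 0) then cellInd g ((z : Int) + dz, (y : Int) + dy, (x : Int) + dx) else 0)).sum)).sum
      = (([-1, 0, 1] : List Int).map (fun dy =>
          (([-1, 0, 1] : List Int).map (fun dx =>
            cellInd g ((z : Int) + dz, (y : Int) + dy, (x : Int) + dx)
              - (if dz = 0 ∧ dy = 0 ∧ dx = 0 then cellInd g ((z : Int) + dz, (y : Int) + dy, (x : Int) + dx) else 0))).sum)).sum := by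
    intro dz _
    refine congrArg List.sum (List.map_congr_left ?_)
    intro dy _
    refine congrArg List.sum (List.map_congr_left ?_)
    intro dx _
    split_ifs <;> ring
  rw [List.map_congr_left hpt]
  have hsub : (([-1, 0, 1] : List Int).map (fun dz =>
        (([-1, 0, 1] : List Int).map (fun dy =>
          (([-1, 0, 1] : List Int).map (fun dx =>
            cellInd g ((z : Int) + dz, (y : Int) + dy, (x : Int) + dx)
              - (if dz = 0 ∧ dy = 0 ∧ dx = 0 then cellInd g ((z : Int) + dz, (y : Int) + dy, (x : Int) + dx) else 0))).sum)).sum)).sum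
      = (([-1, 0, 1] : List Int).map (fun dz =>
          (([-1, 0, 1] : List Int).map (fun dy =>
            (([-1, 0, 1] : List Int).map (fun dx =>
              cellInd g ((z : Int) + dz, (y : Int) + dy, (x : Int) + dx))).sum)).sum)).sum
        - (([-1, 0, 1] : List Int).map (fun dz =>
            (([-1, 0, 1] : List Int).map (fun dy =>
              (([-1, 0, 1] : List Int).map (fun dx =>
                if dz = 0 ∧ dy = 0 ∧ dx = 0 then cellInd g ((z : Int) + dz, (y : Int) + dy, (x : Int) + dx) else 0)).sum)).sum)).sum := by
    rw [← sum_map_sub]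
    refine congrArg List.sum (List.map_congr_left ?_)
    intro dz _
    rw [← sum_map_sub]
    refine congrArg List.sum (List.map_congr_left ?_)
    intro dy _
    rw [← sum_map_sub]
  rw [hsub]
  have hcenter : (([-1, 0, 1] : List Int).map (fun dz =>
        (([-1, 0, 1] : List Int).map (fun dy =>
          (([-1, 0, 1] : List Int).map (fun dx =>
            if dz = 0 ∧ dy = 0 ∧ dx = 0 then cellInd g ((z : Int) + dz, (y : Int) + dy, (x : Int) + dx) else 0)).sum)).sum)).sum
      = cellInd g ((z : Int), (y : Int), (x : Int)) := by
    norm_num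
  rw [hcenter, triple_cellInd g ny nx hrect z y x hz hy hx]
  have hcell : cellInd g ((z : Int), (y : Int), (x : Int))
      = (if ((g.getD z []).getD y []).getD x "" = "#" then (1 : Int) else 0) := by
    have hpe : g.getD z [] = g[z] := List.getD_eq_getElem g [] hz
    have hp : g.getD z [] ∈ g := by rw [hpe]; exact List.getElem_mem hz
    have hpl : (g.getD z []).length = ny := (hrect _ hp).1
    have hre : (g.getD z []).getD y [] = (g.getD z [])[y] := List.getD_eq_getElem _ [] (by omega)
    have hrm : (g.getD z []).getD y [] ∈ g.getD z [] := by rw [hre]; exact List.getElem_mem (by omega)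
    have hrl : ((g.getD z []).getD y []).length = nx := (hrect _ hp).2 _ hrm
    unfold cellInd
    simp only [Int.toNat_natCast]
    rw [if_congr (show _ ↔ ((g.getD z []).getD y []).getD x "" = "#" from ?_) rfl rfl]
    constructor
    · rintro ⟨_, _, _, _, _, _, hc⟩; exact hc
    · intro hc
      refine ⟨by omega, by exact_mod_cast hz, by omega, ?_, by omega, ?_, hc⟩
      · rw [hpl]; exact_mod_cast hy
      · rw [hrl]; exact_mod_cast hx
  rw [hcell, cntA_canon g ny nx hrect hny hnx z y x hz hy hx]

-- ===== per-cycle steps =====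
def stepA (state g : List (List (List String))) : List (List (List String)) :=
  (List.range state.length).map (fun (z : Nat) =>
    (List.range (state.headD []).length).map (fun (y : Nat) =>
      (List.range ((state.headD []).headD []).length).map (fun (x : Nat) =>
        let c := PySem.List.pyGetD (PySem.List.pyGetD (PySem.List.pyGetD g (z : Int) []) (y : Int) []) (x : Int) ""
        let an := cntA (x : Int) (y : Int) (z : Int) g
        if c = "#" ∧ ¬(an = 2 ∨ an = 3) then "."
        else if c = "." ∧ an = 3 then "#"
        else c)))

def stepBd (g : List (List (List String))) : List (List (List String)) :=
  (PySem.List.enumerate g 0).map (fun zp =>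
    (PySem.List.enumerate zp.2 0).map (fun yp =>
      (PySem.List.enumerate yp.2 0).map (fun xc =>
        ruleB xc.2 ((scatterB g).getD (zp.1, yp.1, xc.1) 0))))

theorem stepBd_eq (g : List (List (List String))) :
    stepBd g = (List.range g.length).map (fun (z : Nat) =>
      (List.range (g.getD z []).length).map (fun (y : Nat) =>
        (List.range ((g.getD z []).getD y []).length).map (fun (x : Nat) =>
          ruleB (((g.getD z []).getD y []).getD x "") ((scatterB g).getD ((z : Int), (y : Int), (x : Int)) 0)))) := by
  unfold stepBd
  rw [PySem.List.enumerate_eq_map_pyRange g []]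
  simp only [PySem.List.len_eq]
  rw [PySem.List.pyRange_zero_nat g.length]
  rw [List.map_map, List.map_map]
  refine List.map_congr_left ?_
  intro z hzm
  simp only [Function.comp_apply, PySem.List.pyGetD_natCast]
  rw [PySem.List.enumerate_eq_map_pyRange (g.getD z []) []]
  simp only [PySem.List.len_eq]
  rw [PySem.List.pyRange_zero_nat (g.getD z []).length]
  rw [List.map_map, List.map_map]
  refine List.map_congr_left ?_
  intro y hym
  simp only [Function.comp_apply, PySem.List.pyGetD_natCast]
  rw [PySem.List.enumerate_eq_map_pyRange ((g.getD z []).getD y []) ""]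
  simp only [PySem.List.len_eq]
  rw [PySem.List.pyRange_zero_nat ((g.getD z []).getD y []).length]
  rw [List.map_map, List.map_map]
  refine List.map_congr_left ?_
  intro x hxm
  simp only [Function.comp_apply, PySem.List.pyGetD_natCast]

theorem step_eq (state g : List (List (List String))) (ny nx : Nat)
    (hny : (state.headD []).length = ny) (hnx : ((state.headD []).headD []).length = nx)
    (hrect : RectD g ny nx) (hlen : g.length = state.length) :
    stepA state g = stepBd g := by
  rw [stepBd_eq]
  unfold stepA
  rw [← hlen]
  refine List.map_congr_left ?_
  intro z hzm
  rw [List.mem_range] at hzm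
  have hz : z < g.length := hzm
  have hpe : g.getD z [] = g[z] := List.getD_eq_getElem g [] hz
  have hp : g.getD z [] ∈ g := by rw [hpe]; exact List.getElem_mem hz
  have hpl : (g.getD z []).length = ny := (hrect _ hp).1
  rw [hny, hpl]
  refine List.map_congr_left ?_
  intro y hym
  rw [List.mem_range] at hym
  have hre : (g.getD z []).getD y [] = (g.getD z [])[y] := List.getD_eq_getElem _ [] (by omega)
  have hr : (g.getD z []).getD y [] ∈ g.getD z [] := by
    rw [hre]; exact List.getElem_mem (by omega)
  have hrl : ((g.getD z []).getD y []).length = nx := (hrect _ hp).2 _ hr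
  rw [hnx, hrl]
  refine List.map_congr_left ?_
  intro x hxm
  rw [List.mem_range] at hxm
  have hp0 : g.getD 0 [] ∈ g := by
    rw [List.getD_eq_getElem g [] (by omega)]; exact List.getElem_mem (by omega)
  have hplen : (g.getD 0 []).length = ny := (hrect _ hp0).1
  have hgny : (g.headD []).length = ny := by
    rw [headD_eq_getD]; exact hplen
  have hr0 : (g.getD 0 []).getD 0 [] ∈ g.getD 0 [] := by
    have hlen0 : 0 < (g.getD 0 []).length := by omega
    rw [List.getD_eq_getElem (g.getD 0 []) [] hlen0]
    exact List.getElem_mem hlen0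
  have hgnx : ((g.headD []).headD []).length = nx := by
    rw [headD_eq_getD g [], headD_eq_getD (g.getD 0 []) []]
    exact (hrect _ hp0).2 _ hr0
  rw [scatter_count g ny nx hrect hgny hgnx z y x hz hym hxm]
  simp only [ruleB, PySem.List.pyGetD_natCast]

theorem step_shape (state g : List (List (List String))) (ny nx : Nat)
    (hny : (state.headD []).length = ny) (hnx : ((state.headD []).headD []).length = nx) :
    RectD (stepA state g) ny nx ∧ (stepA state g).length = state.length := by
  constructor
  · intro p hp
    simp only [stepA, List.mem_map] at hp
    obtain ⟨z, _, rfl⟩ := hp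
    refine ⟨by simpa using hny, ?_⟩
    intro r hr
    simp only [List.mem_map] at hr
    obtain ⟨y, _, rfl⟩ := hr
    simpa using hnx
  · simp [stepA]

theorem foldl_iter {α β : Type} (f : α → α) (l : List β) (init : α) :
    l.foldl (fun s _ => f s) init = f^[l.length] init := by
  induction l generalizing init with
  | nil => rfl
  | cons a t ih =>
    rw [List.foldl_cons, ih]
    simp only [List.length_cons, Function.iterate_succ_apply]

-- ===== VERDICT (by name: the statement is the Claim_ definition above) =====
theorem advance_spec : Claim_equal_advance := by
  unfold Claim_equal_advance
  intro state cycles _ hpre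
  unfold Spec_advance
  show advance state cycles = advance_alt state cycles
  unfold advance advance_alt
  show (PySem.List.pyRange 0 cycles 1).foldl (fun old (_ : Int) => stepA state old) state
     = (PySem.List.pyRange 0 cycles 1).foldl (fun cur (_ : Int) => stepBd cur) state
  rw [foldl_iter (stepA state), foldl_iter stepBd]
  by_cases hc : cycles ≤ 0
  · rw [PySem.List.pyRange_one_eq_nil hc]
    rfl
  · have hrect : RectD state (state.headD []).length ((state.headD []).headD []).length := by
      unfold Pre_advance at hpre
      rcases hpre with h | h
      · omega
      · exact h
    have key : ∀ n : Nat,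
        (stepA state)^[n] state = stepBd^[n] state ∧
        RectD ((stepA state)^[n] state) (state.headD []).length ((state.headD []).headD []).length ∧
        ((stepA state)^[n] state).length = state.length := by
      intro n
      induction n with
      | zero => exact ⟨rfl, hrect, rfl⟩
      | succ n ih =>
        obtain ⟨heq, hr, hl⟩ := ih
        rw [Function.iterate_succ_apply', Function.iterate_succ_apply']
        refine ⟨?_, (step_shape state _ _ _ rfl rfl).1, (step_shape state _ _ _ rfl rfl).2⟩
        rw [← heq]
        exact step_eq state _ _ _ rfl rfl hr hl
    exact (key _).1
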